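-- pv_equiv track=rewrite | github.com/paiml/depyler | examples/hard_final_sec_mac.py | truncate_mac
-- ===== SOURCE A (Python) =====
-- def truncate_mac(full_mac: int, num_bits: int) -> int:
--     """Truncate MAC to fewer bits."""
--     mask: int = 1
--     i: int = 0
--     while i < num_bits:
--         mask = mask * 2
--         i = i + 1
--     mask = mask - 1
--     return full_mac % (mask + 1)
-- ===== SOURCE B (Python) =====
-- def truncate_mac(full_mac: int, num_bits: int) -> int:
--     """Truncate MAC to fewer bits by reconstructing its binary expansion."""
--     result = 0
--     weight = 1
--     x = full_mac
--     i = 0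
--     while i < num_bits:
--         result = result + (x % 2) * weight
--         x = x // 2
--         weight = weight * 2
--         i = i + 1
--     return result
-- ===== Notes on version B (the rewrite author's own statement) =====
-- stated objective: alternative
-- what changed: B reconstructs the low num_bits bit by bit (accumulating (x % 2) * weight while halving x and doubling the weight) instead of building a 2^num_bits mask in a loop and taking a single modulo.
import Mathlib
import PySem

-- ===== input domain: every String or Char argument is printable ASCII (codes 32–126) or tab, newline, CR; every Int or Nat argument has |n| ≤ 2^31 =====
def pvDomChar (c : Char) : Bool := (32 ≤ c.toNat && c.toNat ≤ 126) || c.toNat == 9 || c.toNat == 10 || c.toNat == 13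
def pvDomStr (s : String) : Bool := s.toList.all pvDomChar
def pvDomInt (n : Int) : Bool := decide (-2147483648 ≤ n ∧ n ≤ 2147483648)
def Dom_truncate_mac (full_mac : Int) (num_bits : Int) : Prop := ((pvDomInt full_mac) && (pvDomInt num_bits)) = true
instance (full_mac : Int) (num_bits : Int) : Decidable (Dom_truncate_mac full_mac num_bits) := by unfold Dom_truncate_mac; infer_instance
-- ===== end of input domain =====

-- B reconstructs the low num_bits bit by bit instead of building a mask and taking one modulo;
-- same cost, alternative algorithm (equivalence proved, including negative full_mac and num_bits ≤ 0).

-- ===== PORT A =====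
-- the 'while i < num_bits' mask-doubling loop of A
def truncMaskLoop (num_bits mask i : Int) : Int :=
  if i < num_bits then truncMaskLoop num_bits (mask * 2) (i + 1) else mask
termination_by (num_bits - i).toNat
decreasing_by omega

def truncate_mac (full_mac : Int) (num_bits : Int) : Int :=
  let mask := truncMaskLoop num_bits 1 0
  let mask := mask - 1
  PySem.Int.mod full_mac (mask + 1)

-- ===== PORT B =====
-- the 'while i < num_bits' bit-reconstruction loop of B
def truncBitsLoop (num_bits result x weight i : Int) : Int :=
  if i < num_bits then
    truncBitsLoop num_bits (result + PySem.Int.mod x 2 * weight)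
      (PySem.Int.floordiv x 2) (weight * 2) (i + 1)
  else result
termination_by (num_bits - i).toNat
decreasing_by omega

def truncate_mac_alt (full_mac : Int) (num_bits : Int) : Int :=
  truncBitsLoop num_bits 0 full_mac 1 0

-- ===== PRECONDITION & SPEC =====
def Spec_truncate_mac (full_mac : Int) (num_bits : Int) (out : Int) : Prop := out = truncate_mac_alt full_mac num_bits
instance (full_mac : Int) (num_bits : Int) (out : Int) : Decidable (Spec_truncate_mac full_mac num_bits out) := by unfold Spec_truncate_mac; infer_instance

-- ===== CLAIM (what is proved, stated in full; the proofs are below) =====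
def Claim_equal_truncate_mac : Prop := ∀ (full_mac : Int) (num_bits : Int), Dom_truncate_mac full_mac num_bits → Spec_truncate_mac full_mac num_bits (truncate_mac full_mac num_bits)

-- ===== LEMMAS AND PROOFS =====

theorem truncMaskLoop_eq (num_bits : Int) :
    ∀ (mask i : Int), truncMaskLoop num_bits mask i = mask * 2 ^ (num_bits - i).toNat := by
  intro mask i
  fun_induction truncMaskLoop num_bits mask i with
  | case1 mask i h ih =>
    have : (num_bits - i).toNat = (num_bits - (i + 1)).toNat + 1 := by omega
    rw [ih, this, pow_succ]; ring
  | case2 mask i h =>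
    have : (num_bits - i).toNat = 0 := by omega
    simp [this]

theorem truncBitsLoop_eq (num_bits : Int) :
    ∀ (result x weight i : Int), 0 < weight → 0 ≤ result → result < weight →
      truncBitsLoop num_bits result x weight i
        = (x * weight + result) % (weight * 2 ^ (num_bits - i).toNat) := by
  intro result x weight i
  fun_induction truncBitsLoop num_bits result x weight i with
  | case1 result x weight i h ih =>
    intro hw hr0 hrw
    have hmod : PySem.Int.mod x 2 = x % 2 := PySem.Int.mod_eq_emod_of_pos (by omega)
    have hdiv : PySem.Int.floordiv x 2 = x / 2 := PySem.Int.floordiv_eq_ediv_of_pos (by omega)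
    have hb0 : 0 ≤ x % 2 := Int.emod_nonneg x (by omega)
    have hb1 : x % 2 < 2 := Int.emod_lt_of_pos x (by omega)
    have hrec := ih (by omega)
      (by rw [hmod]; nlinarith) (by rw [hmod]; nlinarith)
    rw [hrec]
    have hx : 2 * (x / 2) + x % 2 = x := Int.mul_ediv_add_emod x 2
    have hpow : (num_bits - i).toNat = (num_bits - (i + 1)).toNat + 1 := by omega
    rw [hmod, hdiv, hpow, pow_succ]
    congr 1 <;> nlinarith
  | case2 result x weight i h =>
    intro hw hr0 hrw
    have : (num_bits - i).toNat = 0 := by omega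
    rw [this, pow_zero, mul_one]
    have : x * weight + result = result + weight * x := by ring
    rw [this, Int.add_mul_emod_self_left, Int.emod_eq_of_lt hr0 hrw]

-- ===== VERDICT (by name: the statement is the Claim_ definition above) =====
theorem truncate_mac_spec : Claim_equal_truncate_mac := by
  unfold Claim_equal_truncate_mac Spec_truncate_mac
  intro full_mac num_bits _
  unfold truncate_mac truncate_mac_alt
  rw [truncMaskLoop_eq, truncBitsLoop_eq num_bits 0 full_mac 1 0 (by omega) le_rfl (by omega)]
  simp only [sub_add_cancel, one_mul, mul_one, add_zero]
  rw [PySem.Int.mod_eq_emod_of_pos (by positivity)]
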